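-- pv_equiv track=rewrite | github.com/kev5655/bfh-python | ex2.py | int_to_binary_bool_lst
-- ===== SOURCE A (Python) =====
-- def int_to_binary_bool_lst(i: int) -> list[bool]:
--     if i > 7:
--         return []
--     binary = bin(i).replace('0b', '')
--     boolList = []
--     for i in binary:
--         match i:
--             case "0":
--                 boolList.append(False)
--             case "1":
--                 boolList.append(True)
--     return boolList
-- ===== SOURCE B (Python) =====
-- def int_to_binary_bool_lst(i: int) -> list[bool]:
--     if i > 7:
--         return []
--     n = abs(i)
--     if n == 0:
--         return [False]
--     bits = []
--     while n:
--         bits.append(n % 2 == 1)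
--         n //= 2
--     bits.reverse()
--     return bits
-- ===== Notes on version B (the rewrite author's own statement) =====
-- stated objective: alternative
-- what changed: B extracts the bits arithmetically (repeated %2 and //2, then one reverse) instead of formatting with bin() and parsing the resulting string character by character.
import Mathlib
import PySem

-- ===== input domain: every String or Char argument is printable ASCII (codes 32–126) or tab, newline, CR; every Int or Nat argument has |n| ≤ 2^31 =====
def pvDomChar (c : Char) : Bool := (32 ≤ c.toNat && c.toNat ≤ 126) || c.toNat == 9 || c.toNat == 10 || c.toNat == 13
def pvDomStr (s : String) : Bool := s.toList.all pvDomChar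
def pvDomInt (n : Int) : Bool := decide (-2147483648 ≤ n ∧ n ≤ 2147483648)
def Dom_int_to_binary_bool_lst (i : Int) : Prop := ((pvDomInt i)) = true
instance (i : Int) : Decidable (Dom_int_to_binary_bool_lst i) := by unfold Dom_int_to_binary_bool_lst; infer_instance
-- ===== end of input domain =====

-- B computes the bits arithmetically (repeated %2 and //2, then reverse) instead of
-- formatting with bin() and parsing the string; same values, same O(log n) cost.


-- ===== PORT A =====
-- binary digits of n (most significant first), as bin() prints them for n > 0
def pvBinDigits : Nat → List Char
  | 0 => []
  | (n+1) => pvBinDigits ((n+1)/2) ++ [if (n+1) % 2 = 1 then '1' else '0']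
decreasing_by exact Nat.div_lt_self (Nat.succ_pos n) (by norm_num)

-- bin(i) as a char list: optional '-', then '0b', then the digits of |i| ('0b0' for 0)
def pvBinChars (i : Int) : List Char :=
  (if i < 0 then ['-'] else []) ++ ['0', 'b'] ++
    (if i.natAbs = 0 then ['0'] else pvBinDigits i.natAbs)

-- the for-loop with its match statement ('-' hits no case and is skipped)
def pvLoopA : List Bool → List Char → List Bool
  | acc, [] => acc
  | acc, c :: cs =>
      pvLoopA (if c = '0' then acc ++ [false] else if c = '1' then acc ++ [true] else acc) cs

def int_to_binary_bool_lst (i : Int) : List Bool :=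
  if i > 7 then []
  else pvLoopA [] (PySem.Chars.replace (pvBinChars i) ['0', 'b'] [])

-- ===== PORT B =====
-- the while loop: bits of n, least significant first
def pvBits : Nat → List Bool
  | 0 => []
  | (n+1) => (decide ((n+1) % 2 = 1)) :: pvBits ((n+1)/2)
decreasing_by exact Nat.div_lt_self (Nat.succ_pos n) (by norm_num)

def int_to_binary_bool_lst_alt (i : Int) : List Bool :=
  if i > 7 then []
  else
    let n := i.natAbs
    if n = 0 then [false] else (pvBits n).reverse

-- ===== PRECONDITION & SPEC =====
def Spec_int_to_binary_bool_lst (i : Int) (out : List Bool) : Prop := out = int_to_binary_bool_lst_alt i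
instance (i : Int) (out : List Bool) : Decidable (Spec_int_to_binary_bool_lst i out) := by unfold Spec_int_to_binary_bool_lst; infer_instance

-- ===== CLAIM (what is proved, stated in full; the proofs are below) =====
def Claim_equal_int_to_binary_bool_lst : Prop := ∀ (i : Int), Dom_int_to_binary_bool_lst i → Spec_int_to_binary_bool_lst i (int_to_binary_bool_lst i)

-- ===== LEMMAS AND PROOFS =====

lemma pvBinDigits_mem : ∀ n, ∀ c ∈ pvBinDigits n, c = '0' ∨ c = '1' := by
  intro n
  induction n using Nat.strong_induction_on with
  | _ n ih =>
    match n with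
    | 0 => simp [pvBinDigits]
    | (m+1) =>
      rw [pvBinDigits]
      intro c hc
      rcases List.mem_append.1 hc with h | h
      · exact ih ((m+1)/2) (Nat.div_lt_self (Nat.succ_pos m) (by norm_num)) c h
      · rcases List.mem_singleton.1 h with rfl
        split <;> simp

lemma go_copy : ∀ fuel ds acc, ds.length ≤ fuel → (∀ c ∈ ds, c = '0' ∨ c = '1') →
    PySem.Chars.replace.go ['0', 'b'] [] fuel ds acc = acc.reverse ++ ds := by
  intro fuel
  induction fuel with
  | zero =>
    intro ds acc h _
    rw [PySem.Chars.replace.go]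
  | succ f ih =>
    intro ds acc h hmem
    cases ds with
    | nil => rw [PySem.Chars.replace.go] <;> simp
    | cons c t =>
      have hpre : (['0', 'b'].isPrefixOf (c :: t)) = false := by
        cases t with
        | nil => simp [List.isPrefixOf]
        | cons c' t' =>
          have := hmem c' (by simp)
          simp [List.isPrefixOf]
          rintro rfl rfl
          rcases this with h | h <;> simp at h
      rw [PySem.Chars.replace.go]
      simp only [hpre, Bool.false_eq_true, if_false]
      rw [ih t (c :: acc) (by simpa using Nat.lt_succ_iff.mp (by simpa using h))
            (fun x hx => hmem x (by simp [hx]))]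
      simp

lemma go_step_0b (fuel : Nat) (ds acc : List Char) :
    PySem.Chars.replace.go ['0', 'b'] [] (fuel+1) ('0' :: 'b' :: ds) acc
      = PySem.Chars.replace.go ['0', 'b'] [] fuel ds acc := by
  rw [PySem.Chars.replace.go]
  simp [List.isPrefixOf]

lemma go_step_dash (fuel : Nat) (t acc : List Char) :
    PySem.Chars.replace.go ['0', 'b'] [] (fuel+1) ('-' :: t) acc
      = PySem.Chars.replace.go ['0', 'b'] [] fuel t ('-' :: acc) := by
  rw [PySem.Chars.replace.go]
  simp [List.isPrefixOf]

lemma go_strip (pre ds : List Char) (hpre : pre = [] ∨ pre = ['-'])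
    (hmem : ∀ c ∈ ds, c = '0' ∨ c = '1') :
    PySem.Chars.replace (pre ++ ['0', 'b'] ++ ds) ['0', 'b'] [] = pre ++ ds := by
  rw [PySem.Chars.replace]
  rcases hpre with rfl | rfl
  · simp only [List.nil_append, List.cons_append, List.isEmpty_cons, Bool.false_eq_true,
      if_false, List.length_cons]
    rw [go_step_0b, go_copy _ _ _ (Nat.le_succ _) hmem]
    simp
  · simp only [List.cons_append, List.nil_append, List.isEmpty_cons, Bool.false_eq_true,
      if_false, List.length_cons]
    rw [go_step_dash, go_step_0b, go_copy _ _ _ (Nat.le_succ _) hmem]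
    simp

lemma pvLoopA_digits : ∀ ds acc, (∀ c ∈ ds, c = '0' ∨ c = '1') →
    pvLoopA acc ds = acc ++ ds.map (fun c => c == '1') := by
  intro ds
  induction ds with
  | nil => intro acc _; simp [pvLoopA]
  | cons c t ih =>
    intro acc hmem
    rw [pvLoopA, ih _ (fun x hx => hmem x (by simp [hx]))]
    rcases hmem c (by simp) with rfl | rfl <;> simp

lemma map_pvBinDigits : ∀ n, (pvBinDigits n).map (fun c => c == '1') = (pvBits n).reverse := by
  intro n
  induction n using Nat.strong_induction_on with
  | _ n ih =>
    match n with
    | 0 => simp [pvBinDigits, pvBits]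
    | (m+1) =>
      rw [pvBinDigits, pvBits]
      rw [List.map_append, ih ((m+1)/2) (Nat.div_lt_self (Nat.succ_pos m) (by norm_num))]
      simp only [List.map_cons, List.map_nil, List.reverse_cons]
      congr 1
      by_cases h : (m+1) % 2 = 1 <;> simp [h]

-- ===== VERDICT (by name: the statement is the Claim_ definition above) =====
theorem int_to_binary_bool_lst_spec : Claim_equal_int_to_binary_bool_lst := by
  unfold Claim_equal_int_to_binary_bool_lst Spec_int_to_binary_bool_lst
  intro i _
  unfold int_to_binary_bool_lst int_to_binary_bool_lst_alt
  by_cases hgt : i > 7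
  · simp [hgt]
  · simp only [hgt, if_false]
    by_cases h0 : i.natAbs = 0
    · have : i = 0 := Int.natAbs_eq_zero.mp h0
      subst this
      decide
    · have hmem := pvBinDigits_mem i.natAbs
      unfold pvBinChars
      simp only [h0, if_false]
      by_cases hneg : i < 0
      · simp only [hneg, if_true]
        rw [go_strip ['-'] _ (Or.inr rfl) hmem]
        simp only [List.singleton_append]
        rw [show pvLoopA [] ('-' :: pvBinDigits i.natAbs)
              = pvLoopA [] (pvBinDigits i.natAbs) by rw [pvLoopA]; simp]
        rw [pvLoopA_digits _ _ hmem, map_pvBinDigits]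
        simp
      · simp only [hneg, if_false]
        rw [go_strip [] _ (Or.inl rfl) hmem]
        simp only [List.nil_append]
        rw [pvLoopA_digits _ _ hmem, map_pvBinDigits]
        simp
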